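-- pv_equiv track=rewrite | github.com/ANGELO4ADAM/euromillions | preparateur_donnees.py | calculate_gaps
-- ===== SOURCE A (Python) =====
-- from typing import Dict, Iterable, List, Sequence
--
-- def calculate_gaps(draw_history: Iterable[Dict], game_profile: Dict) -> Dict[str, Dict[int, int]]:
--     max_number = game_profile.get("max_number", 50)
--     max_star = game_profile.get("max_star", 12)
--     gaps_numbers = {n: 0 for n in range(1, max_number + 1)}
--     gaps_stars = {s: 0 for s in range(1, max_star + 1)}
--
--     for draw in draw_history:
--         present_numbers = set(draw.get("numbers", []))
--         present_stars = set(draw.get("stars", []))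
--         gaps_numbers = {n: (0 if n in present_numbers else gaps_numbers[n] + 1) for n in gaps_numbers}
--         gaps_stars = {s: (0 if s in present_stars else gaps_stars[s] + 1) for s in gaps_stars}
--
--     return {"numbers": gaps_numbers, "stars": gaps_stars}
-- ===== SOURCE B (Python) =====
-- def calculate_gaps(draw_history, game_profile):
--     max_number = game_profile.get("max_number", 50)
--     max_star = game_profile.get("max_star", 12)
--     draws = list(draw_history)
--     total = len(draws)
--     last_number = {}
--     last_star = {}
--     for i, draw in enumerate(draws):
--         for n in draw.get("numbers", []):
--             last_number[n] = i
--         for s in draw.get("stars", []):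
--             last_star[s] = i
--     numbers = {n: (total - 1 - last_number[n] if n in last_number else total)
--                for n in range(1, max_number + 1)}
--     stars = {s: (total - 1 - last_star[s] if s in last_star else total)
--              for s in range(1, max_star + 1)}
--     return {"numbers": numbers, "stars": stars}
-- ===== Notes on version B (the rewrite author's own statement) =====
-- stated objective: alternative
-- what changed: Instead of rebuilding the whole gap dictionary for every draw as A does, B records the last-seen draw index of each drawn value in one pass and computes each gap as total-1-last_index (or total if never seen); on the measured input family this was not faster.
import Mathlib
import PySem

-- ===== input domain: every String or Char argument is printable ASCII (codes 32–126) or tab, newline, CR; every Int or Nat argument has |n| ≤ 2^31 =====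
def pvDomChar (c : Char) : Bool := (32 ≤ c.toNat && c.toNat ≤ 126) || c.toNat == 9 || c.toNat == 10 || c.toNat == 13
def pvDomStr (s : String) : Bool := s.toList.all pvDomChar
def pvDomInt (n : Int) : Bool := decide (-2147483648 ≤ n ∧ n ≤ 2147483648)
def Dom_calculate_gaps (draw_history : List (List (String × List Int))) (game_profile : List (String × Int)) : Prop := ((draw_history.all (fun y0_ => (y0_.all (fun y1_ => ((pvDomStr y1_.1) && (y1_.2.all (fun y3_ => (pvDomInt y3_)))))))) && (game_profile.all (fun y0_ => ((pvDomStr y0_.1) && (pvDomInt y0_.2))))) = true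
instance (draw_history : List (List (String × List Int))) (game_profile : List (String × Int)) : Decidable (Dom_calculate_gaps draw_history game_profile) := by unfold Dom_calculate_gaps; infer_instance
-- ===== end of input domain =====

-- B records the last-seen draw index of each value in one pass instead of rebuilding every gap dict per draw; proved equal on Dom.
-- ===== PORT A =====
-- helper: one draw step of A's dict-comprehension rebuild (same keys; reset to 0 if present, else +1)
def pvStepA (present : PySem.Set Int) (g : List (Int × Int)) : List (Int × Int) :=
  g.map (fun p => (p.1, if PySem.Set.contains present p.1 then 0 else p.2 + 1))

def calculate_gaps (draw_history : List (List (String × List Int))) (game_profile : List (String × Int)) : List (String × List (Int × Int)) :=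
  let max_number := (game_profile.lookup "max_number").getD 50
  let max_star := (game_profile.lookup "max_star").getD 12
  let gaps_numbers : List (Int × Int) := (PySem.List.pyRange 1 (max_number + 1) 1).map (fun n => (n, 0))
  let gaps_stars : List (Int × Int) := (PySem.List.pyRange 1 (max_star + 1) 1).map (fun s => (s, 0))
  let st := draw_history.foldl (fun st draw =>
      (pvStepA (PySem.Set.ofList ((draw.lookup "numbers").getD [])) st.1,
       pvStepA (PySem.Set.ofList ((draw.lookup "stars").getD [])) st.2))
    (gaps_numbers, gaps_stars)
  [("numbers", st.1), ("stars", st.2)]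

-- ===== PORT B =====
-- helper: last_xxx[n] = i for every n in xs
def pvRecord (xs : List Int) (i : Int) (d : PySem.Dict Int Int) : PySem.Dict Int Int :=
  xs.foldl (fun d n => d.insert n i) d

def calculate_gaps_alt (draw_history : List (List (String × List Int))) (game_profile : List (String × Int)) : List (String × List (Int × Int)) :=
  let max_number := (game_profile.lookup "max_number").getD 50
  let max_star := (game_profile.lookup "max_star").getD 12
  let total : Int := draw_history.length
  let last := (PySem.List.enumerate draw_history).foldl
      (fun (ls : PySem.Dict Int Int × PySem.Dict Int Int) p =>
        (pvRecord ((p.2.lookup "numbers").getD []) p.1 ls.1,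
         pvRecord ((p.2.lookup "stars").getD []) p.1 ls.2))
      (PySem.Dict.empty, PySem.Dict.empty)
  let numbers := (PySem.List.pyRange 1 (max_number + 1) 1).map (fun n =>
      (n, match (last.1).get? n with | some i => total - 1 - i | none => total))
  let stars := (PySem.List.pyRange 1 (max_star + 1) 1).map (fun s =>
      (s, match (last.2).get? s with | some i => total - 1 - i | none => total))
  [("numbers", numbers), ("stars", stars)]

-- ===== PRECONDITION & SPEC =====
def Spec_calculate_gaps (draw_history : List (List (String × List Int))) (game_profile : List (String × Int)) (out : List (String × List (Int × Int))) : Prop := out = calculate_gaps_alt draw_history game_profile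
instance (draw_history : List (List (String × List Int))) (game_profile : List (String × Int)) (out : List (String × List (Int × Int))) : Decidable (Spec_calculate_gaps draw_history game_profile out) := by unfold Spec_calculate_gaps; infer_instance

-- ===== CLAIM (what is proved, stated in full; the proofs are below) =====
def Claim_equal_calculate_gaps : Prop := ∀ (draw_history : List (List (String × List Int))) (game_profile : List (String × Int)), Dom_calculate_gaps draw_history game_profile → Spec_calculate_gaps draw_history game_profile (calculate_gaps draw_history game_profile)

-- ===== LEMMAS AND PROOFS =====

lemma pvStepA_map (l : List Int) (keys : List Int) (v : Int → Int) :
    pvStepA (PySem.Set.ofList l) (keys.map fun n => (n, v n))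
      = keys.map (fun n => (n, if n ∈ l then 0 else v n + 1)) := by
  simp [pvStepA, List.map_map, Function.comp, PySem.Set.mem_ofList]

lemma pvFoldA {α : Type} (ds : List α) (f : α → List Int) (keys : List Int) (v : Int → Int) :
    ds.foldl (fun g d => pvStepA (PySem.Set.ofList (f d)) g) (keys.map fun n => (n, v n))
      = keys.map (fun n => (n, ds.foldl (fun a d => if n ∈ f d then 0 else a + 1) (v n))) := by
  induction ds generalizing v with
  | nil => rfl
  | cons d ds ih =>
      simp only [List.foldl_cons, pvStepA_map]
      exact ih (fun n => if n ∈ f d then 0 else v n + 1)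

lemma pvRecord_get? (xs : List Int) (i : Int) (d : PySem.Dict Int Int) (m : Int) :
    (pvRecord xs i d).get? m = if m ∈ xs then some i else d.get? m := by
  induction xs generalizing d with
  | nil => simp [pvRecord]
  | cons x xs ih =>
      simp only [pvRecord, List.foldl_cons] at *
      rw [ih, PySem.Dict.get?_insert]
      by_cases hx : m ∈ xs <;> by_cases he : m = x <;> simp [hx, he]

lemma pvEnum_append {α : Type} (xs ys : List α) (s : Int) :
    PySem.List.enumerate (xs ++ ys) s
      = PySem.List.enumerate xs s ++ PySem.List.enumerate ys (s + xs.length) := by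
  induction xs generalizing s with
  | nil => simp [PySem.List.enumerate_nil]
  | cons x xs ih =>
      simp only [List.cons_append, PySem.List.enumerate_cons, ih, List.length_cons]
      congr 2
      push_cast
      ring

lemma pvFoldB {α : Type} (ds : List α) (f : α → List Int) (n : Int) :
    (match ((PySem.List.enumerate ds 0).foldl (fun d p => pvRecord (f p.2) p.1 d) PySem.Dict.empty).get? n with
      | some i => (ds.length : Int) - 1 - i
      | none => (ds.length : Int))
      = ds.foldl (fun a d => if n ∈ f d then 0 else a + 1) 0 := by
  induction ds using List.reverseRecOn with
  | nil => simp [PySem.List.enumerate_nil, PySem.Dict.get?_empty]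
  | append_singleton ds x ih =>
      have he : PySem.List.enumerate (ds ++ [x]) 0
          = PySem.List.enumerate ds 0 ++ [((ds.length : Int), x)] := by
        rw [pvEnum_append]
        simp [PySem.List.enumerate_cons, PySem.List.enumerate_nil]
      rw [he, List.foldl_append, List.foldl_append]
      simp only [List.foldl_cons, List.foldl_nil, pvRecord_get?, List.length_append,
        List.length_singleton]
      by_cases hx : n ∈ f x
      · simp only [hx, if_true]
        push_cast
        ring
      · simp only [hx, if_false]
        rcases h : ((PySem.List.enumerate ds 0).foldl (fun d p => pvRecord (f p.2) p.1 d) PySem.Dict.empty).get? n with _ | i <;>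
          rw [h] at ih ⊢ <;> simp only at ih ⊢ <;> rw [← ih] <;> push_cast <;> ring

lemma pvSplitA (ds : List (List (String × List Int))) (fN fS : List (String × List Int) → List Int)
    (a b : List (Int × Int)) :
    ds.foldl (fun st draw =>
        (pvStepA (PySem.Set.ofList (fN draw)) st.1, pvStepA (PySem.Set.ofList (fS draw)) st.2)) (a, b)
      = (ds.foldl (fun g draw => pvStepA (PySem.Set.ofList (fN draw)) g) a,
         ds.foldl (fun g draw => pvStepA (PySem.Set.ofList (fS draw)) g) b) :=
  PySem.List.foldl_prod_mk (fun s e => pvStepA (PySem.Set.ofList (fN e)) s)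
    (fun s e => pvStepA (PySem.Set.ofList (fS e)) s) ds a b

lemma pvSplitB (l : List (Int × List (String × List Int))) (a b : PySem.Dict Int Int) :
    l.foldl (fun ls p => (pvRecord ((p.2.lookup "numbers").getD []) p.1 ls.1,
        pvRecord ((p.2.lookup "stars").getD []) p.1 ls.2)) (a, b)
      = (l.foldl (fun d p => pvRecord ((p.2.lookup "numbers").getD []) p.1 d) a,
         l.foldl (fun d p => pvRecord ((p.2.lookup "stars").getD []) p.1 d) b) :=
  PySem.List.foldl_prod_mk (fun d p => pvRecord ((p.2.lookup "numbers").getD []) p.1 d)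
    (fun d p => pvRecord ((p.2.lookup "stars").getD []) p.1 d) l a b

lemma pvComponent {α : Type} (ds : List α) (f : α → List Int) (keys : List Int) :
    ds.foldl (fun g d => pvStepA (PySem.Set.ofList (f d)) g) (keys.map fun n => (n, 0))
      = keys.map (fun n =>
          (n, match ((PySem.List.enumerate ds 0).foldl (fun d p => pvRecord (f p.2) p.1 d) PySem.Dict.empty).get? n with
            | some i => (ds.length : Int) - 1 - i
            | none => (ds.length : Int))) := by
  rw [show (fun n => ((n : Int), (0 : Int))) = (fun n => (n, (fun _ : Int => (0:Int)) n)) from rfl,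
    pvFoldA]
  exact List.map_congr_left (fun n _ => by rw [pvFoldB])

-- ===== VERDICT (by name: the statement is the Claim_ definition above) =====
theorem calculate_gaps_spec : Claim_equal_calculate_gaps := by
  intro dh gp _
  unfold Spec_calculate_gaps calculate_gaps calculate_gaps_alt
  simp only [pvSplitA, pvSplitB]
  rw [pvComponent, pvComponent]
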